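-- pv_equiv track=rewrite | github.com/MiguelR90/katas | leetcode/easy-0594-longest-harmonious-subs.py | longest_harmonious
-- ===== SOURCE A (Python) =====
-- from itertools import combinations
--
-- def longest_harmonious(nums: list[int]) -> int:
--     longest: int = 0
--
--     for k in range(1, len(nums) + 1):
--         # no reason to keep checking since there's no subseq prior that is harmonic
--         if k - longest > 2:
--             break
--
--         for subs in combinations(nums, k):
--             if max(subs) - min(subs) == 1:
--                 longest = len(subs)
--
--                 # no reason to keep checking for subs k
--                 break
--
--     return longest
-- ===== SOURCE B (Python) =====
-- def longest_harmonious(nums: list[int]) -> int: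
--     count: dict[int, int] = {}
--     for x in nums:
--         count[x] = count.get(x, 0) + 1
--     best = 0
--     for x, c in count.items():
--         if x + 1 in count:
--             best = max(best, c + count[x + 1])
--     return best
-- ===== Notes on version B (the rewrite author's own statement) =====
-- stated objective: faster
-- what changed: Replaces the exhaustive scan over itertools.combinations of every length with a single frequency-count pass and a max of count[x]+count[x+1] over values x whose successor also occurs.
import Mathlib
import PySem

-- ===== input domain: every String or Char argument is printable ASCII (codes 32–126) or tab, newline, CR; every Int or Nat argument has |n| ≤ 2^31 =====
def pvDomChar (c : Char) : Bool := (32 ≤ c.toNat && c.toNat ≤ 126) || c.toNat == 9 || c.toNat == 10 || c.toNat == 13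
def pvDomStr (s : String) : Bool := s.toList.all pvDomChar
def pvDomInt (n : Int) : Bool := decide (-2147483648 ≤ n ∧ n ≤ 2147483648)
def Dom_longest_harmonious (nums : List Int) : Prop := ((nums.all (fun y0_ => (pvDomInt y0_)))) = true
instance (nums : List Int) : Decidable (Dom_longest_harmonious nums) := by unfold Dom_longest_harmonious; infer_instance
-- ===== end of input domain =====

-- B replaces A's scan over itertools.combinations of every length with a single
-- frequency-count pass and a max of count[x]+count[x+1] over occurring values x.

-- ===== PORT A =====
-- Python max(subs)/min(subs) on the nonempty tuples A builds (k ≥ 1)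
def pyMaxNE (s : List Int) : Int := match s with | [] => 0 | x :: t => t.foldl max x
def pyMinNE (s : List Int) : Int := match s with | [] => 0 | x :: t => t.foldl min x

-- the outer 'for k in range(...)' with its break, state 'longest'
def harmA (nums : List Int) : List Int → Int → Int
  | [], longest => longest
  | k :: rest, longest =>
    if k - longest > 2 then longest
    else
      -- inner loop: first combination with max - min == 1 sets longest = len(subs) and breaks
      match (PySem.List.combinations nums k.toNat).find?
              (fun s => decide (pyMaxNE s - pyMinNE s = 1)) with
      | some s => harmA nums rest (s.length : Int)
      | none => harmA nums rest longest

def longest_harmonious (nums : List Int) : Int :=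
  harmA nums (PySem.List.pyRange 1 ((nums.length : Int) + 1) 1) 0

-- ===== PORT B =====
def longest_harmonious_alt (nums : List Int) : Int :=
  let count := nums.foldl (fun d x => d.insert x (d.getD x 0 + 1)) PySem.Dict.empty
  count.items.foldl
    (fun best p =>
      if count.contains (p.1 + 1) then max best (p.2 + count.getD (p.1 + 1) 0) else best) 0

-- ===== PRECONDITION & SPEC =====
def Spec_longest_harmonious (nums : List Int) (out : Int) : Prop := out = longest_harmonious_alt nums
instance (nums : List Int) (out : Int) : Decidable (Spec_longest_harmonious nums out) := by unfold Spec_longest_harmonious; infer_instance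

-- ===== CLAIM (what is proved, stated in full; the proofs are below) =====
def Claim_equal_longest_harmonious : Prop := ∀ (nums : List Int), Dom_longest_harmonious nums → Spec_longest_harmonious nums (longest_harmonious nums)

-- ===== LEMMAS AND PROOFS =====

-- B's fold unfolded: a running max over the distinct values of nums
lemma alt_eq_fold (nums : List Int) :
    longest_harmonious_alt nums =
      (PySem.Set.ofList nums).foldl
        (fun best x =>
          if nums.contains (x + 1) then max best ((nums.count x : Int) + (nums.count (x + 1) : Int))
          else best) 0 := by
  unfold longest_harmonious_alt
  simp only [PySem.Dict.foldl_insert_getD_add_one_eq_counter, PySem.Dict.items_counter,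
    List.foldl_map, PySem.Dict.contains_counter, PySem.Dict.getD_counter]

-- generic properties of a conditional running max
lemma foldl_condmax (p : Int → Bool) (g : Int → Int) :
    ∀ (ys : List Int) (b : Int),
      b ≤ ys.foldl (fun b x => if p x then max b (g x) else b) b ∧
      (∀ x ∈ ys, p x = true → g x ≤ ys.foldl (fun b x => if p x then max b (g x) else b) b) ∧
      (ys.foldl (fun b x => if p x then max b (g x) else b) b = b ∨
        ∃ x ∈ ys, p x = true ∧ ys.foldl (fun b x => if p x then max b (g x) else b) b = g x) := by
  intro ys
  induction ys with
  | nil => exact fun b => ⟨le_rfl, by simp, Or.inl rfl⟩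
  | cons y ys ih =>
    intro b
    by_cases hp : p y = true
    · have h := ih (max b (g y))
      refine ⟨le_trans (le_max_left _ _) (by simpa [hp] using h.1), ?_, ?_⟩
      · intro x hx hpx
        rcases List.mem_cons.1 hx with rfl | hx
        · exact le_trans (le_max_right _ _) (by simpa [hp] using h.1)
        · simpa [hp] using h.2.1 x hx hpx
      · rcases h.2.2 with heq | ⟨x, hx, hpx, heq⟩
        · rcases max_choice b (g y) with hm | hm
          · exact Or.inl (by simp only [List.foldl_cons, hp, if_true]; rw [heq, hm])
          · exact Or.inr ⟨y, List.mem_cons_self, hp,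
              by simp only [List.foldl_cons, hp, if_true]; rw [heq, hm]⟩
        · exact Or.inr ⟨x, List.mem_cons_of_mem _ hx, hpx, by simpa [hp] using heq⟩
    · have h := ih b
      refine ⟨by simpa [hp] using h.1, ?_, ?_⟩
      · intro x hx hpx
        rcases List.mem_cons.1 hx with rfl | hx
        · exact absurd hpx hp
        · simpa [hp] using h.2.1 x hx hpx
      · rcases h.2.2 with heq | ⟨x, hx, hpx, heq⟩
        · exact Or.inl (by simpa [hp] using heq)
        · exact Or.inr ⟨x, List.mem_cons_of_mem _ hx, hpx, by simpa [hp] using heq⟩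

lemma le_alt (nums : List Int) (x : Int) (hx : x ∈ nums) (h1 : (x + 1) ∈ nums) :
    (nums.count x : Int) + (nums.count (x + 1) : Int) ≤ longest_harmonious_alt nums := by
  rw [alt_eq_fold]
  exact (foldl_condmax (fun x => nums.contains (x + 1))
    (fun x => (nums.count x : Int) + (nums.count (x + 1) : Int)) (PySem.Set.ofList nums) 0).2.1 x
    ((PySem.Set.mem_ofList nums x).2 hx) (by simpa using h1)

lemma alt_cases (nums : List Int) :
    longest_harmonious_alt nums = 0 ∨
      ∃ x, x ∈ nums ∧ (x + 1) ∈ nums ∧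
        longest_harmonious_alt nums = (nums.count x : Int) + (nums.count (x + 1) : Int) := by
  have h := (foldl_condmax (fun x => nums.contains (x + 1))
    (fun x => (nums.count x : Int) + (nums.count (x + 1) : Int)) (PySem.Set.ofList nums) 0).2.2
  rw [alt_eq_fold]
  rcases h with h | ⟨x, hx, hpx, heq⟩
  · exact Or.inl h
  · exact Or.inr ⟨x, (PySem.Set.mem_ofList nums x).1 hx, by simpa using hpx, heq⟩

-- two-value lists: length = count x + count y
lemma length_eq_two_counts {x y : Int} (hxy : x ≠ y) :
    ∀ (s : List Int), (∀ z ∈ s, z = x ∨ z = y) → s.length = s.count x + s.count y := by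
  intro s
  induction s with
  | nil => simp
  | cons z s ih =>
    intro h
    have hz := h z List.mem_cons_self
    have ih' := ih (fun w hw => h w (List.mem_cons_of_mem _ hw))
    have hyx : y ≠ x := Ne.symm hxy
    rcases hz with rfl | rfl
    · rw [List.length_cons, List.count_cons_self, List.count_cons_of_ne hxy, ih']
      omega
    · rw [List.length_cons, List.count_cons_of_ne hyx, List.count_cons_self, ih']
      omega

-- a sublist with prescribed counts of two distinct values exists
lemma sublist_with_counts {x y : Int} (hxy : x ≠ y) :
    ∀ (l : List Int) (a b : Nat), a ≤ l.count x → b ≤ l.count y →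
      ∃ t : List Int, t.Sublist l ∧ t.count x = a ∧ t.count y = b ∧ (∀ z ∈ t, z = x ∨ z = y) := by
  intro l
  induction l with
  | nil =>
    intro a b ha hb
    simp only [List.count_nil, Nat.le_zero] at ha hb
    exact ⟨[], List.Sublist.refl _, by simp [ha], by simp [hb], by simp⟩
  | cons z l ih =>
    intro a b ha hb
    by_cases hzx : z = x
    · subst hzx
      rw [List.count_cons_self] at ha
      rw [List.count_cons_of_ne hxy] at hb
      cases a with
      | zero =>
        obtain ⟨t, hs, hcx, hcy, hmem⟩ := ih 0 b (Nat.zero_le _) hb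
        exact ⟨t, hs.cons _, hcx, hcy, hmem⟩
      | succ a' =>
        obtain ⟨t, hs, hcx, hcy, hmem⟩ := ih a' b (by omega) hb
        refine ⟨z :: t, hs.cons₂ _, ?_, ?_, ?_⟩
        · rw [List.count_cons_self, hcx]
        · rw [List.count_cons_of_ne hxy, hcy]
        · intro w hw
          rcases List.mem_cons.1 hw with rfl | hw
          · exact Or.inl rfl
          · exact hmem w hw
    · by_cases hzy : z = y
      · subst hzy
        rw [List.count_cons_of_ne (Ne.symm hxy)] at ha
        rw [List.count_cons_self] at hb
        cases b with
        | zero =>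
          obtain ⟨t, hs, hcx, hcy, hmem⟩ := ih a 0 ha (Nat.zero_le _)
          exact ⟨t, hs.cons _, hcx, hcy, hmem⟩
        | succ b' =>
          obtain ⟨t, hs, hcx, hcy, hmem⟩ := ih a b' ha (by omega)
          refine ⟨z :: t, hs.cons₂ _, ?_, ?_, ?_⟩
          · rw [List.count_cons_of_ne (Ne.symm hxy), hcx]
          · rw [List.count_cons_self, hcy]
          · intro w hw
            rcases List.mem_cons.1 hw with rfl | hw
            · exact Or.inr rfl
            · exact hmem w hw
      · rw [List.count_cons_of_ne hzx] at ha
        rw [List.count_cons_of_ne hzy] at hb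
        obtain ⟨t, hs, hcx, hcy, hmem⟩ := ih a b ha hb
        exact ⟨t, hs.cons _, hcx, hcy, hmem⟩

-- a harmonious combination of size r exists iff some x has both x and x+1 present and enough copies
lemma exists_harm_iff (nums : List Int) (r : Nat) :
    (∃ s ∈ PySem.List.combinations nums r, pyMaxNE s - pyMinNE s = 1) ↔
      (2 ≤ r ∧ ∃ x, x ∈ nums ∧ (x + 1) ∈ nums ∧ r ≤ nums.count x + nums.count (x + 1)) := by
  constructor
  · rintro ⟨s, hsmem, hpred⟩
    obtain ⟨hsub, hlen⟩ := (PySem.List.mem_combinations_iff nums r s).1 hsmem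
    cases s with
    | nil => simp [pyMaxNE, pyMinNE] at hpred
    | cons a t =>
      set M := t.foldl max a with hM
      set m := t.foldl min a with hm
      have hMm : M - m = 1 := hpred
      have hMmem : M ∈ a :: t := by
        rcases PySem.List.foldl_max_mem t a with h | h
        · rw [hM, h]; exact List.mem_cons_self
        · exact List.mem_cons_of_mem _ h
      have hmmem : m ∈ a :: t := by
        rcases PySem.List.foldl_min_mem t a with h | h
        · rw [hm, h]; exact List.mem_cons_self
        · exact List.mem_cons_of_mem _ h
      have hub : ∀ y ∈ a :: t, y ≤ M := by
        intro y hy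
        rcases List.mem_cons.1 hy with rfl | hy
        · exact (PySem.List.le_foldl_max t y).1
        · exact (PySem.List.le_foldl_max t a).2 y hy
      have hlb : ∀ y ∈ a :: t, m ≤ y := by
        intro y hy
        rcases List.mem_cons.1 hy with rfl | hy
        · exact (PySem.List.foldl_min_le t y).1
        · exact (PySem.List.foldl_min_le t a).2 y hy
      have helems : ∀ z ∈ a :: t, z = m ∨ z = m + 1 := by
        intro z hz
        have h1 := hub z hz
        have h2 := hlb z hz
        omega
      have hne : m ≠ m + 1 := by omega
      have hcnt := length_eq_two_counts hne (a :: t) helems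
      have hc1 : 0 < (a :: t).count m := List.count_pos_iff.2 hmmem
      have hc2 : 0 < (a :: t).count (m + 1) := by
        apply List.count_pos_iff.2
        have : M = m + 1 := by omega
        rw [← this]; exact hMmem
      have hle1 := hsub.count_le m
      have hle2 := hsub.count_le (m + 1)
      refine ⟨by omega, m, hsub.subset hmmem, ?_, by omega⟩
      · have : M = m + 1 := by omega
        exact hsub.subset (this ▸ hMmem)
  · rintro ⟨hr2, x, hx, hx1, hcnt⟩
    have hxy : x ≠ x + 1 := by omega
    have hc1 : 0 < nums.count x := List.count_pos_iff.2 hx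
    have hc2 : 0 < nums.count (x + 1) := List.count_pos_iff.2 hx1
    obtain ⟨t, hsub, hcx, hcy, hmem⟩ :=
      sublist_with_counts hxy nums (min (nums.count x) (r - 1)) (r - min (nums.count x) (r - 1))
        (min_le_left _ _) (by omega)
    have hlen : t.length = r := by
      rw [length_eq_two_counts hxy t hmem, hcx, hcy]; omega
    have hxt : x ∈ t := by
      apply List.count_pos_iff.1; rw [hcx]; omega
    have hx1t : x + 1 ∈ t := by
      apply List.count_pos_iff.1; rw [hcy]; omega
    refine ⟨t, (PySem.List.mem_combinations_iff nums r t).2 ⟨hsub, hlen⟩, ?_⟩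
    cases t with
    | nil => simp at hxt
    | cons a u =>
      have hmax : u.foldl max a = x + 1 := by
        have hmem' : u.foldl max a ∈ a :: u := by
          rcases PySem.List.foldl_max_mem u a with h | h
          · rw [h]; exact List.mem_cons_self
          · exact List.mem_cons_of_mem _ h
        have hge : x + 1 ≤ u.foldl max a := by
          rcases List.mem_cons.1 hx1t with rfl | h
          · exact (PySem.List.le_foldl_max u (x + 1)).1
          · exact (PySem.List.le_foldl_max u a).2 _ h
        rcases hmem (u.foldl max a) hmem' with h | h <;> omega
      have hmin : u.foldl min a = x := by
        have hmem' : u.foldl min a ∈ a :: u := by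
          rcases PySem.List.foldl_min_mem u a with h | h
          · rw [h]; exact List.mem_cons_self
          · exact List.mem_cons_of_mem _ h
        have hle : u.foldl min a ≤ x := by
          rcases List.mem_cons.1 hxt with rfl | h
          · exact (PySem.List.foldl_min_le u x).1
          · exact (PySem.List.foldl_min_le u a).2 _ h
        rcases hmem (u.foldl min a) hmem' with h | h <;> omega
      show u.foldl max a - u.foldl min a = 1
      omega

-- hence: a harmonious combination of size r exists iff 2 ≤ r ≤ B
lemma exists_harm_iff_le_alt (nums : List Int) (r : Nat) :
    (∃ s ∈ PySem.List.combinations nums r, pyMaxNE s - pyMinNE s = 1) ↔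
      (2 ≤ (r : Int) ∧ (r : Int) ≤ longest_harmonious_alt nums) := by
  rw [exists_harm_iff]
  constructor
  · rintro ⟨hr2, x, hx, hx1, hcnt⟩
    have hle := le_alt nums x hx hx1
    constructor
    · exact_mod_cast hr2
    · have : (r : Int) ≤ (nums.count x : Int) + (nums.count (x + 1) : Int) := by
        exact_mod_cast hcnt
      omega
  · rintro ⟨hr2, hrB⟩
    have hB : 2 ≤ longest_harmonious_alt nums := by omega
    rcases alt_cases nums with h0 | ⟨x, hx, hx1, heq⟩
    · omega
    · refine ⟨by exact_mod_cast hr2, x, hx, hx1, ?_⟩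
      rw [heq] at hrB
      exact_mod_cast hrB

lemma alt_zero_or_two_le (nums : List Int) :
    longest_harmonious_alt nums = 0 ∨ 2 ≤ longest_harmonious_alt nums := by
  rcases alt_cases nums with h | ⟨x, hx, h1, heq⟩
  · exact Or.inl h
  · right
    have c1 : 0 < nums.count x := List.count_pos_iff.2 hx
    have c2 : 0 < nums.count (x + 1) := List.count_pos_iff.2 h1
    omega

lemma alt_le_len (nums : List Int) :
    longest_harmonious_alt nums ≤ (nums.length : Int) := by
  rcases alt_cases nums with h | ⟨x, hx, h1, heq⟩
  · simp [h]
  · have hc : nums.count (x + 1) ≤ List.countP (fun z => decide ¬(z == x) = true) nums := by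
      apply List.countP_mono_left
      intro z hz hzx
      simp only [beq_iff_eq] at hzx ⊢
      subst hzx; simp
    have hl := List.length_eq_countP_add_countP (fun z => z == x) (l := nums)
    have hcx : nums.count x = List.countP (fun z => z == x) nums := rfl
    rw [heq]
    omega

-- the loop invariant: harmA returns B from any consecutive range with the right accumulator
lemma harmA_spec (nums : List Int) :
    ∀ (ks : List Int) (k0 v : Int),
      ks = PySem.List.pyRange k0 ((nums.length : Int) + 1) 1 → 1 ≤ k0 →
      v = (if 2 ≤ longest_harmonious_alt nums ∧ 3 ≤ k0
            then min (longest_harmonious_alt nums) (k0 - 1) else 0) →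
      harmA nums ks v = longest_harmonious_alt nums := by
  intro ks
  induction ks with
  | nil =>
    intro k0 v hks hk0 hv
    have hge : (nums.length : Int) + 1 ≤ k0 := by
      by_contra h
      push Not at h
      rw [PySem.List.pyRange_one_cons h] at hks
      exact List.cons_ne_nil _ _ hks.symm
    simp only [harmA]
    rcases alt_zero_or_two_le nums with hB | hB
    · rw [hv, if_neg (by omega), hB]
    · have hBle := alt_le_len nums
      rw [hv, if_pos ⟨hB, by omega⟩]
      omega
  | cons k rest ih =>
    intro k0 v hks hk0 hv
    have hlt : k0 < (nums.length : Int) + 1 := by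
      by_contra h
      push Not at h
      rw [PySem.List.pyRange_one_eq_nil h] at hks
      exact List.cons_ne_nil _ _ hks
    rw [PySem.List.pyRange_one_cons hlt] at hks
    obtain ⟨rfl, hrest⟩ := List.cons.injEq .. ▸ hks
    have hBle := alt_le_len nums
    have hB02 := alt_zero_or_two_le nums
    simp only [harmA]
    by_cases hbr : k - v > 2
    · rw [if_pos hbr]
      by_cases hc : 2 ≤ longest_harmonious_alt nums ∧ 3 ≤ k
      · rw [hv, if_pos hc]
        rw [hv, if_pos hc] at hbr
        omega
      · rw [hv, if_neg hc]
        rw [hv, if_neg hc] at hbr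
        omega
    · rw [if_neg hbr]
      have hkNat : (k.toNat : Int) = k := Int.toNat_of_nonneg (by omega)
      cases hf : (PySem.List.combinations nums k.toNat).find?
          (fun s => decide (pyMaxNE s - pyMinNE s = 1)) with
      | some s =>
        have hsmem := List.mem_of_find?_eq_some hf
        have hpred := List.find?_some hf
        obtain ⟨hsub, hlen⟩ := (PySem.List.mem_combinations_iff nums k.toNat s).1 hsmem
        have hex : ∃ s' ∈ PySem.List.combinations nums k.toNat,
            pyMaxNE s' - pyMinNE s' = 1 := ⟨s, hsmem, by simpa using hpred⟩
        have hkB := (exists_harm_iff_le_alt nums k.toNat).1 hex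
        rw [hkNat] at hkB
        apply ih (k + 1) _ hrest (by omega)
        rw [hlen, hkNat, if_pos ⟨by omega, by omega⟩]
        omega
      | none =>
        have hnone := List.find?_eq_none.1 hf
        have hnex : ¬ (2 ≤ (k.toNat : Int) ∧
            (k.toNat : Int) ≤ longest_harmonious_alt nums) := by
          rw [← exists_harm_iff_le_alt]
          rintro ⟨s', hs', hp'⟩
          exact absurd (by simpa using hp') (by simpa using hnone s' hs')
        rw [hkNat] at hnex
        apply ih (k + 1) v hrest (by omega)
        by_cases hc : 2 ≤ longest_harmonious_alt nums ∧ 3 ≤ k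
        · rw [hv, if_pos hc, if_pos ⟨hc.1, by omega⟩]
          omega
        · rw [hv, if_neg hc]
          by_cases hc' : 2 ≤ longest_harmonious_alt nums ∧ 3 ≤ k + 1
          · rw [if_pos hc']
            omega
          · rw [if_neg hc']


-- ===== VERDICT (by name: the statement is the Claim_ definition above) =====
theorem longest_harmonious_spec : Claim_equal_longest_harmonious := by
  intro nums _
  show longest_harmonious nums = longest_harmonious_alt nums
  exact harmA_spec nums _ 1 0 rfl le_rfl (by norm_num)
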